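-- pv_equiv track=rewrite | github.com/morris821028/UVa | practice/python/Number Base.py | checkio
-- ===== SOURCE A (Python) =====
-- def checkio(str_number, radix):
--     x = 0
--     for w in str_number:
--         v = 0
--         if w.isalpha():
--             v = ord(w) - ord('A') + 10
--         elif w.isdigit():
--             v = ord(w) - ord('0')
--         else:
--             return -1
--         if v >= radix:
--             return -1
--         x = x * radix + v
--     return x
-- ===== SOURCE B (Python) =====
-- def checkio(str_number, radix):
--     # Pass 1: validate and collect digit values left-to-right.
--     digits = []
--     for w in str_number:
--         if w.isalpha():
--             v = ord(w) - ord('A') + 10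
--         elif w.isdigit():
--             v = ord(w) - ord('0')
--         else:
--             return -1
--         if v >= radix:
--             return -1
--         digits.append(v)
--     # Pass 2: positional weighting from the rightmost digit.
--     x = 0
--     power = 1
--     for v in reversed(digits):
--         x += v * power
--         power *= radix
--     return x
-- ===== Notes on version B (the rewrite author's own statement) =====
-- stated objective: alternative
-- what changed: Replaces the single Horner-accumulation loop by two differently-shaped passes: a validation pass collecting digit values into a list, then a reverse pass summing value*power with an explicitly maintained running power of the radix.
import Mathlib
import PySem

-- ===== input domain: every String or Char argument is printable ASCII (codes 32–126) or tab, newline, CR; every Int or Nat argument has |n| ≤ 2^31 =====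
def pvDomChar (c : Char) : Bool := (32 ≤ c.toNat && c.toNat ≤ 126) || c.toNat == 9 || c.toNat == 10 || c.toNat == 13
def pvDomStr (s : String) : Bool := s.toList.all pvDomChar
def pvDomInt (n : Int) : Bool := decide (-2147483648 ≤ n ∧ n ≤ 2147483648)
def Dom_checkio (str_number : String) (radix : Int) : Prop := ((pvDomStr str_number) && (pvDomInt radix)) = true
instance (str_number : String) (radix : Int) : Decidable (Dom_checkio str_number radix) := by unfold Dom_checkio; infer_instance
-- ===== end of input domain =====

-- B: same per-character validation, but a two-pass decomposition (collect digit values, then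
-- reverse positional-power summation) instead of A's Horner accumulation. Exact equivalence.

-- ===== PORT A =====
-- Horner loop with early return -1 on an invalid character.
def checkioGo (radix : Int) : List Char → Int → Int
  | [], x => x
  | w :: ws, x =>
    let v : Int :=
      if PySem.Chars.isalpha w then (w.toNat : Int) - ('A'.toNat : Int) + 10
      else if PySem.Chars.isdigit w then (w.toNat : Int) - ('0'.toNat : Int)
      else 0
    if ¬ (PySem.Chars.isalpha w) ∧ ¬ (PySem.Chars.isdigit w) then -1
    else if v ≥ radix then -1
    else checkioGo radix ws (x * radix + v)

def checkio (str_number : String) (radix : Int) : Int :=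
  checkioGo radix str_number.toList 0

-- ===== PORT B =====
-- Pass 1: validate each character and collect its digit value; none = early return -1.
def collectGo (radix : Int) : List Char → Option (List Int)
  | [] => some []
  | w :: ws =>
    let v : Int :=
      if PySem.Chars.isalpha w then (w.toNat : Int) - ('A'.toNat : Int) + 10
      else if PySem.Chars.isdigit w then (w.toNat : Int) - ('0'.toNat : Int)
      else 0
    if ¬ (PySem.Chars.isalpha w) ∧ ¬ (PySem.Chars.isdigit w) then none
    else if v ≥ radix then none
    else (collectGo radix ws).map (fun vs => v :: vs)

-- Pass 2: fold over the reversed digit list maintaining (x, power).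
def revFold (radix : Int) : List Int → Int → Int → Int
  | [], x, _ => x
  | v :: rest, x, power => revFold radix rest (x + v * power) (power * radix)

def checkio_alt (str_number : String) (radix : Int) : Int :=
  match collectGo radix str_number.toList with
  | none => -1
  | some digits => revFold radix digits.reverse 0 1

-- ===== PRECONDITION & SPEC =====
def Spec_checkio (str_number : String) (radix : Int) (out : Int) : Prop := out = checkio_alt str_number radix
instance (str_number : String) (radix : Int) (out : Int) : Decidable (Spec_checkio str_number radix out) := by unfold Spec_checkio; infer_instance

-- ===== CLAIM (what is proved, stated in full; the proofs are below) =====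
def Claim_equal_checkio : Prop := ∀ (str_number : String) (radix : Int), Dom_checkio str_number radix → Spec_checkio str_number radix (checkio str_number radix)

-- ===== LEMMAS AND PROOFS =====

-- polyval l = l[0] + r*l[1] + r^2*l[2] + …
def polyval (radix : Int) : List Int → Int
  | [] => 0
  | v :: rest => v + radix * polyval radix rest

theorem revFold_eq (radix : Int) (l : List Int) : ∀ x p,
    revFold radix l x p = x + p * polyval radix l := by
  induction l with
  | nil => intro x p; simp [revFold, polyval]
  | cons v rest ih => intro x p; simp [revFold, polyval, ih]; ring

theorem polyval_append (radix : Int) (l : List Int) (v : Int) :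
    polyval radix (l ++ [v]) = polyval radix l + v * radix ^ l.length := by
  induction l with
  | nil => simp [polyval]
  | cons w rest ih => simp [polyval, ih]; ring

theorem step_eq (radix t x : Int) (rest : List Char)
    (ih : ∀ x, checkioGo radix rest x =
      match collectGo radix rest with
      | none => -1
      | some vs => x * radix ^ vs.length + polyval radix vs.reverse) :
    (if t ≥ radix then (-1 : Int) else checkioGo radix rest (x * radix + t)) =
      (match (if t ≥ radix then none
              else (collectGo radix rest).map (fun vs => t :: vs)) with
       | none => (-1 : Int)
       | some vs => x * radix ^ vs.length + polyval radix vs.reverse) := by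
  by_cases h : t ≥ radix
  · simp [h]
  · rw [if_neg h, if_neg h, ih]
    cases hc : collectGo radix rest with
    | none => simp
    | some vs => simp [polyval_append]; ring

theorem checkioGo_eq (radix : Int) (ws : List Char) : ∀ x,
    checkioGo radix ws x =
      match collectGo radix ws with
      | none => -1
      | some vs => x * radix ^ vs.length + polyval radix vs.reverse := by
  induction ws with
  | nil => intro x; simp [checkioGo, collectGo, polyval]
  | cons w rest ih =>
    intro x
    simp only [checkioGo, collectGo]
    split
    · rfl
    · exact step_eq radix _ x rest ih

-- ===== VERDICT (by name: the statement is the Claim_ definition above) =====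
theorem checkio_spec : Claim_equal_checkio := by
  intro s radix _
  unfold Spec_checkio checkio checkio_alt
  rw [checkioGo_eq]
  cases h : collectGo radix s.toList with
  | none => simp
  | some vs => simp [revFold_eq]
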